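-- pv_equiv track=rewrite | github.com/yanjiachu/Query-Corrector-BART | src/inference.py | remove_chinese_internal_spaces
-- ===== SOURCE A (Python) =====
-- def remove_chinese_internal_spaces(text):
--     chars = list(text)
--     i = 0
--     while i < len(chars):
--         if chars[i] == ' ':
--             prev_is_letter = (i > 0) and chars[i - 1].isalpha() and chars[i - 1].isascii()
--             next_is_letter = (i < len(chars) - 1) and chars[i + 1].isalpha() and chars[i + 1].isascii()
--             if not (prev_is_letter and next_is_letter):
--                 del chars[i]
--                 continue
--         i += 1
--     return ''.join(chars)
-- ===== SOURCE B (Python) =====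
-- def remove_chinese_internal_spaces(text):
--     out = []
--     n = len(text)
--     for i, c in enumerate(text):
--         if c == ' ':
--             if (out and out[-1].isalpha() and out[-1].isascii()
--                     and i + 1 < n and text[i + 1].isalpha() and text[i + 1].isascii()):
--                 out.append(c)
--         else:
--             out.append(c)
--     return ''.join(out)
-- ===== Notes on version B (the rewrite author's own statement) =====
-- stated objective: faster
-- what changed: Replaces the quadratic while-loop with in-place list deletion by a single forward pass that appends to an output list, keeping a space iff the last kept char and the next original char are ASCII letters.
import Mathlib
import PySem

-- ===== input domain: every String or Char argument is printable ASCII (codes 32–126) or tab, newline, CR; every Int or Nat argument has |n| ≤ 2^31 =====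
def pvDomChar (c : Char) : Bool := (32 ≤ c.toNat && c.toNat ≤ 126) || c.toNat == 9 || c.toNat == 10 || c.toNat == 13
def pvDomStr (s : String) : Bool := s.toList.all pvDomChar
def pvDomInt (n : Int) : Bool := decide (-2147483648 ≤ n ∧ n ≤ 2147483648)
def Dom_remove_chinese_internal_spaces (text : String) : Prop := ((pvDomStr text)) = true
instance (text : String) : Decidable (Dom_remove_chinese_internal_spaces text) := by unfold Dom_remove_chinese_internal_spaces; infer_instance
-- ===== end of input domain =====

-- B replaces A's quadratic in-place deletion loop by one forward pass over the characters (asymptotically faster).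

-- Python's `c.isalpha() and c.isascii()` is exactly "ASCII letter" = Lean's Char.isAlpha.
def pvIsLetter (c : Char) : Bool := c.isAlpha

-- ===== PORT A =====
-- A's while-loop: state = (current char list, index i); `del chars[i]` = eraseIdx.
def rcisLoopA (chars : List Char) (i : Nat) : List Char :=
  if h : i < chars.length then
    if chars.getD i ' ' = ' ' then
      if !((decide (0 < i) && pvIsLetter (chars.getD (i - 1) ' ')) &&
           (decide (i < chars.length - 1) && pvIsLetter (chars.getD (i + 1) ' '))) then
        rcisLoopA (chars.eraseIdx i) i
      else
        rcisLoopA chars (i + 1)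
    else
      rcisLoopA chars (i + 1)
  else chars
termination_by chars.length - i
decreasing_by
  · simp [List.length_eraseIdx, h]; omega
  · omega
  · omega

def remove_chinese_internal_spaces (text : String) : String :=
  String.mk (rcisLoopA text.toList 0)

-- ===== PORT B =====
-- `out and out[-1].isalpha() and out[-1].isascii()` resp. the `text[i+1]` lookahead, on a list's head.
def pvHeadLetter (l : List Char) : Bool :=
  match l with
  | [] => false
  | a :: _ => pvIsLetter a

-- B's single pass: `out` is kept reversed (head = out[-1]); `rest` gives the lookahead text[i+1].
def rcisLoopB (cs : List Char) (out : List Char) : List Char :=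
  match cs with
  | [] => out
  | c :: rest =>
    if c = ' ' then
      if pvHeadLetter out && pvHeadLetter rest then
        rcisLoopB rest (c :: out)
      else
        rcisLoopB rest out
    else
      rcisLoopB rest (c :: out)

def remove_chinese_internal_spaces_alt (text : String) : String :=
  String.mk (rcisLoopB text.toList []).reverse

-- ===== PRECONDITION & SPEC =====
def Spec_remove_chinese_internal_spaces (text : String) (out : String) : Prop := out = remove_chinese_internal_spaces_alt text
instance (text : String) (out : String) : Decidable (Spec_remove_chinese_internal_spaces text out) := by unfold Spec_remove_chinese_internal_spaces; infer_instance

-- ===== CLAIM (what is proved, stated in full; the proofs are below) =====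
def Claim_equal_remove_chinese_internal_spaces : Prop := ∀ (text : String), Dom_remove_chinese_internal_spaces text → Spec_remove_chinese_internal_spaces text (remove_chinese_internal_spaces text)

-- ===== LEMMAS AND PROOFS =====

lemma rcis_getD_mid (l r : List Char) (c d : Char) : (l ++ c :: r).getD l.length d = c := by
  simp [List.getD]

lemma rcis_getD_mid_succ (l r : List Char) (c d : Char) :
    (l ++ c :: r).getD (l.length + 1) d = r.getD 0 d := by
  simp [List.getD, List.getElem?_append_right (by omega : l.length ≤ l.length + 1)]

lemma rcis_erase_mid (l r : List Char) (c : Char) : (l ++ c :: r).eraseIdx l.length = l ++ r := by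
  induction l with
  | nil => simp
  | cons a t ih => simp [ih]

lemma rcisLoopB_cons (c : Char) (rest out : List Char) :
    rcisLoopB (c :: rest) out =
      if c = ' ' then
        if pvHeadLetter out && pvHeadLetter rest then rcisLoopB rest (c :: out)
        else rcisLoopB rest out
      else rcisLoopB rest (c :: out) := rfl

-- Invariant: A's loop at index acc.length on (acc.reverse ++ suf), where acc.reverse is the
-- already-kept prefix, computes exactly B's pass over suf with reversed output acc.
lemma rcis_key (suf : List Char) : ∀ acc : List Char,
    rcisLoopA (acc.reverse ++ suf) acc.length = (rcisLoopB suf acc).reverse := by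
  induction suf with
  | nil =>
    intro acc
    rw [rcisLoopA, rcisLoopB]
    simp
  | cons c rest ih =>
    intro acc
    rw [rcisLoopA]
    have hlen : acc.length < (acc.reverse ++ c :: rest).length := by simp
    rw [dif_pos hlen]
    have hmid : (acc.reverse ++ c :: rest).getD acc.length ' ' = c := by
      have := rcis_getD_mid acc.reverse (c :: rest) c ' '
      simpa using this
    rw [hmid]
    have hstep : ∀ (a : Char), rcisLoopA (acc.reverse ++ a :: rest) (acc.length + 1)
        = (rcisLoopB rest (a :: acc)).reverse := by
      intro a
      have h1 : acc.reverse ++ a :: rest = (a :: acc).reverse ++ rest := by simp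
      have h2 : acc.length + 1 = (a :: acc).length := by simp
      rw [h1, h2, ih]
    rw [rcisLoopB_cons]
    by_cases hc : c = ' '
    · subst hc
      rw [if_pos rfl, if_pos rfl]
      have hprev : (decide (0 < acc.length) && pvIsLetter ((acc.reverse ++ ' ' :: rest).getD (acc.length - 1) ' '))
          = pvHeadLetter acc := by
        cases acc with
        | nil => simp [pvHeadLetter]
        | cons a t =>
          have h1 : (a :: t).reverse ++ ' ' :: rest = t.reverse ++ a :: (' ' :: rest) := by simp
          rw [h1]
          have hl : (a :: t).length - 1 = t.reverse.length := by simp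
          rw [hl, rcis_getD_mid]
          simp [pvHeadLetter]
      have hnext : (decide (acc.length < (acc.reverse ++ ' ' :: rest).length - 1) && pvIsLetter ((acc.reverse ++ ' ' :: rest).getD (acc.length + 1) ' '))
          = pvHeadLetter rest := by
        cases rest with
        | nil => simp [pvHeadLetter]
        | cons b rs =>
          have hlt : acc.length < (acc.reverse ++ ' ' :: b :: rs).length - 1 := by simp
          have hg : (acc.reverse ++ ' ' :: b :: rs).getD (acc.length + 1) ' ' = b := by
            have := rcis_getD_mid_succ acc.reverse (b :: rs) ' ' ' '
            simpa using this
          rw [hg]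
          simp [pvHeadLetter]
      rw [hprev, hnext]
      cases hcond : (pvHeadLetter acc && pvHeadLetter rest) with
      | true =>
        simp only [Bool.not_true, reduceIte]
        exact hstep ' '
      | false =>
        simp only [Bool.not_false, reduceIte]
        have herase : (acc.reverse ++ ' ' :: rest).eraseIdx acc.length = acc.reverse ++ rest := by
          have := rcis_erase_mid acc.reverse rest ' '
          simpa using this
        rw [herase, ih]
        simp
    · rw [if_neg hc, if_neg hc, hstep c]

-- ===== VERDICT (by name: the statement is the Claim_ definition above) =====
theorem remove_chinese_internal_spaces_spec : Claim_equal_remove_chinese_internal_spaces := by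
  intro text _
  unfold Spec_remove_chinese_internal_spaces remove_chinese_internal_spaces remove_chinese_internal_spaces_alt
  have h := rcis_key text.toList []
  simp only [List.reverse_nil, List.nil_append, List.length_nil] at h
  exact congrArg String.mk h
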